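-- pv_equiv track=rewrite | github.com/TeraSurror/interview-prep | meta_puzzles/level 1/scoreboard_inference.py | getMinProblemCount
-- ===== SOURCE A (Python) =====
-- def getMinProblemCount(N, S):
--     num_2_points = S[0] // 2
--     num_1_points = S[0] % 2
--
--     for i in range(1, len(S)):
--         new_n2p = S[i] // 2
--         new_n1p = S[i] % 2
--
--         if new_n2p > num_2_points:
--             num_2_points = new_n2p
--         if new_n1p > num_1_points:
--             num_1_points = new_n1p
--
--     return num_2_points + num_1_points
-- ===== SOURCE B (Python) =====
-- def getMinProblemCount(N, S):
--     # Divide and conquer: solve(lo, hi) returns (max of s//2, max of s%2)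
--     # over the segment S[lo:hi]; combine halves by componentwise max.
--     def solve(lo, hi):
--         if hi - lo == 1:
--             return S[lo] // 2, S[lo] % 2
--         mid = (lo + hi) // 2
--         a2, a1 = solve(lo, mid)
--         b2, b1 = solve(mid, hi)
--         return max(a2, b2), max(a1, b1)
--     d, r = solve(0, len(S))
--     return d + r
-- ===== Notes on version B (the rewrite author's own statement) =====
-- stated objective: alternative
-- what changed: Replaces A's left-to-right scan keeping two running maxima with a recursive divide-and-conquer over index ranges that solves each half independently and merges the two (max-half, max-parity) pairs by componentwise max, relying on associativity/commutativity of max.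
import Mathlib
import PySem

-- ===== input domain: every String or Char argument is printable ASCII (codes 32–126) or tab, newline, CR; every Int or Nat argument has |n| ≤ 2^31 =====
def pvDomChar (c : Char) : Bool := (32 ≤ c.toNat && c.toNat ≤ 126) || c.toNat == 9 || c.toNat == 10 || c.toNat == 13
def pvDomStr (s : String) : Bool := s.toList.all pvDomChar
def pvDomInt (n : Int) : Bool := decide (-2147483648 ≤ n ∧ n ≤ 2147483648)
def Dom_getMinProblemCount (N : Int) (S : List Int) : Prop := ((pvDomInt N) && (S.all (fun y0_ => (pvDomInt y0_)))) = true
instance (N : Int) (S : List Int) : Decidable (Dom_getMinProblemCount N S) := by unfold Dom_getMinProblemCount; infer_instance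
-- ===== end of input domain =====

-- B replaces A's single scan with two running maxima by a recursive divide-and-conquer over
-- index ranges, merging (max-half, max-parity) pairs of the two halves; objective: alternative.

-- ===== PORT A =====
-- S[0] raises IndexError on empty S; Pre_ requires S ≠ [], so pyGetD's default is never used
def getMinProblemCount (N : Int) (S : List Int) : Int :=
  let num2 := PySem.Int.floordiv (PySem.List.pyGetD S 0 0) 2
  let num1 := PySem.Int.mod (PySem.List.pyGetD S 0 0) 2
  let st := (PySem.List.pyRange 1 (S.length : Int) 1).foldl
    (fun (st : Int × Int) i =>
      let s := PySem.List.pyGetD S i 0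
      let new2 := PySem.Int.floordiv s 2
      let new1 := PySem.Int.mod s 2
      ((if new2 > st.1 then new2 else st.1),
       (if new1 > st.2 then new1 else st.2)))
    (num2, num1)
  st.1 + st.2

-- ===== PORT B =====
-- Python's solve(lo, hi) diverges when hi ≤ lo (unreachable under Pre_); the 'hi ≤ lo' guard
-- only makes the Lean recursion total, it changes nothing on the inputs the claim covers.
def pvSolve (S : List Int) (lo hi : Nat) : Int × Int :=
  if hi ≤ lo then (0, 0)
  else if hi - lo = 1 then
    (PySem.Int.floordiv (PySem.List.pyGetD S (lo : Int) 0) 2,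
     PySem.Int.mod (PySem.List.pyGetD S (lo : Int) 0) 2)
  else
    let mid := (lo + hi) / 2
    let a := pvSolve S lo mid
    let b := pvSolve S mid hi
    (max a.1 b.1, max a.2 b.2)
termination_by hi - lo
decreasing_by all_goals omega

def getMinProblemCount_alt (N : Int) (S : List Int) : Int :=
  let dr := pvSolve S 0 S.length
  dr.1 + dr.2

-- ===== PRECONDITION & SPEC =====
-- A raises IndexError on S = [] (S[0]); those inputs are excluded (B's recursion has no base case there either).
def Pre_getMinProblemCount (N : Int) (S : List Int) : Prop := S ≠ []
instance (N : Int) (S : List Int) : Decidable (Pre_getMinProblemCount N S) := by unfold Pre_getMinProblemCount; infer_instance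
def pvWitness_getMinProblemCount : Int × List Int := (3, [1, 2, 5])

def Spec_getMinProblemCount (N : Int) (S : List Int) (out : Int) : Prop := out = getMinProblemCount_alt N S
instance (N : Int) (S : List Int) (out : Int) : Decidable (Spec_getMinProblemCount N S out) := by unfold Spec_getMinProblemCount; infer_instance

-- ===== CLAIM (what is proved, stated in full; the proofs are below) =====
def Claim_equal_getMinProblemCount : Prop := ∀ (N : Int) (S : List Int), Dom_getMinProblemCount N S → Pre_getMinProblemCount N S → Spec_getMinProblemCount N S (getMinProblemCount N S)

-- ===== LEMMAS AND PROOFS =====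

-- componentwise max on pairs, and the per-element contribution (s//2, s%2)
def pvPmax (a b : Int × Int) : Int × Int := (max a.1 b.1, max a.2 b.2)
def pvPhi (s : Int) : Int × Int := (PySem.Int.floordiv s 2, PySem.Int.mod s 2)

-- the common fold both programs compute: running componentwise max of pvPhi over a list
def pvFold (a : Int × Int) (L : List Int) : Int × Int :=
  L.foldl (fun st s => pvPmax st (pvPhi s)) a

lemma pvPmax_assoc (a b c : Int × Int) : pvPmax (pvPmax a b) c = pvPmax a (pvPmax b c) := by
  simp [pvPmax, max_assoc]

lemma pvPmax_idem (a : Int × Int) : pvPmax a a = a := by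
  simp [pvPmax]

lemma pvFold_pmax (L : List Int) : ∀ a b, pvFold (pvPmax a b) L = pvPmax a (pvFold b L) := by
  induction L with
  | nil => intro a b; simp [pvFold]
  | cons s L ih =>
    intro a b
    simp only [pvFold, List.foldl_cons] at *
    rw [pvPmax_assoc]
    exact ih a (pvPmax b (pvPhi s))

-- the max-pair of a nonempty list, seeded (idempotently) by its head
def pvM (L : List Int) : Int × Int := pvFold (pvPhi (L.headD 0)) L

lemma pvM_cons (x : Int) (xs : List Int) : pvM (x :: xs) = pvFold (pvPhi x) xs := by
  simp only [pvM, pvFold, List.headD_cons, List.foldl_cons, pvPmax_idem]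

lemma pvM_append (L1 L2 : List Int) (h1 : L1 ≠ []) (h2 : L2 ≠ []) :
    pvM (L1 ++ L2) = pvPmax (pvM L1) (pvM L2) := by
  match L1, L2 with
  | x :: xs, y :: ys =>
    rw [List.cons_append, pvM_cons, pvM_cons, pvM_cons]
    simp only [pvFold, List.foldl_append, List.foldl_cons]
    have : (x :: xs).foldl (fun st s => pvPmax st (pvPhi s)) (pvPhi x)
        = pvFold (pvPhi x) xs := by
      simp [pvFold, pvPmax_idem]
    rw [show ((xs.foldl (fun st s => pvPmax st (pvPhi s)) (pvPhi x))) = pvFold (pvPhi x) xs from rfl]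
    exact pvFold_pmax ys (pvFold (pvPhi x) xs) (pvPhi y)

-- the segment S[lo:hi]
def pvSeg (S : List Int) (lo hi : Nat) : List Int := (S.drop lo).take (hi - lo)

lemma pvSeg_ne_nil (S : List Int) (lo hi : Nat) (h1 : lo < hi) (h2 : hi ≤ S.length) :
    pvSeg S lo hi ≠ [] := by
  have : (pvSeg S lo hi).length = min (hi - lo) (S.length - lo) := by
    simp [pvSeg]
  intro hnil
  rw [hnil] at this
  simp at this
  omega

lemma pvSeg_single (S : List Int) (lo : Nat) (h : lo < S.length) :
    pvSeg S lo (lo + 1) = [S.getD lo 0] := by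
  have hd : S.drop lo = S[lo] :: S.drop (lo + 1) := (List.drop_eq_getElem_cons h)
  show (S.drop lo).take (lo + 1 - lo) = _
  rw [show lo + 1 - lo = 1 by omega, hd, List.take_succ_cons, List.take_zero]
  simp [List.getD, List.getElem?_eq_getElem h]

lemma pvSeg_split (S : List Int) (lo mid hi : Nat) (h1 : lo ≤ mid) (h2 : mid ≤ hi) :
    pvSeg S lo hi = pvSeg S lo mid ++ pvSeg S mid hi := by
  simp only [pvSeg]
  rw [show hi - lo = (mid - lo) + (hi - mid) by omega, List.take_add, List.drop_drop]
  rw [show lo + (mid - lo) = mid by omega]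

-- divide-and-conquer computes the segment's max pair
lemma pvSolve_correct (S : List Int) : ∀ (n lo hi : Nat), hi - lo ≤ n → lo < hi → hi ≤ S.length →
    pvSolve S lo hi = pvM (pvSeg S lo hi) := by
  intro n
  induction n with
  | zero => intro lo hi h1 h2 _; omega
  | succ n ih =>
    intro lo hi hn hlt hle
    rw [pvSolve]
    by_cases hb : hi - lo = 1
    · have hlo : lo < S.length := by omega
      have hhi : hi = lo + 1 := by omega
      rw [if_neg (by omega), if_pos hb, hhi, pvSeg_single S lo hlo, pvM_cons]
      simp [pvFold, pvPhi, PySem.List.pyGetD_natCast]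
    · rw [if_neg (by omega), if_neg hb]
      show (max (pvSolve S lo ((lo + hi) / 2)).1 (pvSolve S ((lo + hi) / 2) hi).1,
            max (pvSolve S lo ((lo + hi) / 2)).2 (pvSolve S ((lo + hi) / 2) hi).2)
          = pvM (pvSeg S lo hi)
      have hmid1 : lo < (lo + hi) / 2 := by omega
      have hmid2 : (lo + hi) / 2 < hi := by omega
      rw [ih lo ((lo + hi) / 2) (by omega) hmid1 (by omega),
          ih ((lo + hi) / 2) hi (by omega) hmid2 hle,
          pvSeg_split S lo ((lo + hi) / 2) hi (by omega) (by omega),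
          pvM_append _ _ (pvSeg_ne_nil S lo _ hmid1 (by omega))
                         (pvSeg_ne_nil S _ hi hmid2 hle)]
      rfl

-- A's step function is exactly pvPmax with pvPhi
lemma pv_stepA (st : Int × Int) (s : Int) :
    ((if PySem.Int.floordiv s 2 > st.1 then PySem.Int.floordiv s 2 else st.1),
     (if PySem.Int.mod s 2 > st.2 then PySem.Int.mod s 2 else st.2))
    = pvPmax st (pvPhi s) := by
  simp only [pvPmax, pvPhi, Prod.mk.injEq]
  constructor <;> (split_ifs <;> omega)

-- ===== VERDICT (by name: the statement is the Claim_ definition above) =====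
theorem getMinProblemCount_spec : Claim_equal_getMinProblemCount := by
  intro N S _ hpre
  match S, hpre with
  | x :: rest, _ =>
    unfold Spec_getMinProblemCount
    simp only [getMinProblemCount, getMinProblemCount_alt]
    rw [PySem.List.foldl_pyRange_pyGetD' (x :: rest) 0
        (fun (st : Int × Int) s =>
          ((if PySem.Int.floordiv s 2 > st.1 then PySem.Int.floordiv s 2 else st.1),
           (if PySem.Int.mod s 2 > st.2 then PySem.Int.mod s 2 else st.2)))
        _ (by omega : (0:Int) ≤ 1)]
    have h0 : PySem.List.pyGetD (x :: rest) 0 0 = x := by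
      simp [PySem.List.pyGetD, PySem.List.pyGet?, PySem.List.pyIdx?]
    rw [h0]
    have hA : (x :: rest).drop 1 = rest := rfl
    rw [show (Int.toNat 1) = 1 from rfl, hA]
    have hfold : rest.foldl
        (fun (st : Int × Int) s =>
          ((if PySem.Int.floordiv s 2 > st.1 then PySem.Int.floordiv s 2 else st.1),
           (if PySem.Int.mod s 2 > st.2 then PySem.Int.mod s 2 else st.2)))
        (PySem.Int.floordiv x 2, PySem.Int.mod x 2)
        = pvFold (pvPhi x) rest := by
      simp only [pvFold]
      congr 1
      funext st s
      exact pv_stepA st s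
    rw [hfold]
    rw [pvSolve_correct (x :: rest) (x :: rest).length 0 (x :: rest).length (by omega)
        (by simp) (le_refl _)]
    have hseg : pvSeg (x :: rest) 0 (x :: rest).length = x :: rest := by
      simp [pvSeg]
    rw [hseg, pvM_cons]
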